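-- pv_equiv track=rewrite | github.com/Bilegt04/Compressor-Recommendation | backend/services/coco_export.py | _quantile_bin
-- ===== SOURCE A (Python) =====
-- from typing import Dict, List, Literal, Tuple
--
-- class CocoExportError(RuntimeError):
--     pass
--
-- def _quantile_bin(ranks: List[int], step_count: int) -> List[int]:
--     """
--     Collapse a 1..N ranking into a 1..step_count ordinal scale via quantile
--     binning. Preserves order; ranks within the same quantile receive the
--     same bin number.
--     """
--     if step_count <= 0:
--         raise CocoExportError("step_count must be a positive integer.")
--     if not ranks:
--         return []
--
--     n = len(ranks)
--     # Edge case: fewer items than steps → return ranks as-is (no compression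
--     # possible without inflating distinctness).
--     if n <= step_count:
--         return ranks
--
--     sorted_pairs = sorted(enumerate(ranks), key=lambda p: p[1])
--     binned = [0] * n
--     for new_pos, (orig_idx, _) in enumerate(sorted_pairs):
--         # bin index in [0, step_count-1], then +1 for 1-based
--         bin_idx = (new_pos * step_count) // n
--         binned[orig_idx] = bin_idx + 1
--     return binned
-- ===== SOURCE B (Python) =====
-- class CocoExportError(RuntimeError):
--     pass
--
-- def _quantile_bin(ranks, step_count):
--     """Quantile-bin by direct stable-rank counting instead of sort-and-scatter."""
--     if step_count <= 0:
--         raise CocoExportError("step_count must be a positive integer.")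
--     if not ranks:
--         return []
--     n = len(ranks)
--     if n <= step_count:
--         return ranks
--     out = []
--     for i, r in enumerate(ranks):
--         pos = 0
--         for j, v in enumerate(ranks):
--             if v < r or (v == r and j < i):
--                 pos += 1
--         out.append(pos * step_count // n + 1)
--     return out
-- ===== Notes on version B (the rewrite author's own statement) =====
-- stated objective: alternative
-- what changed: Replaces sort-enumerate-scatter with a direct pass that computes each element's stable sorted position by counting (strictly smaller values, plus equal values at earlier indices) and bins it in place.
import Mathlib
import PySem

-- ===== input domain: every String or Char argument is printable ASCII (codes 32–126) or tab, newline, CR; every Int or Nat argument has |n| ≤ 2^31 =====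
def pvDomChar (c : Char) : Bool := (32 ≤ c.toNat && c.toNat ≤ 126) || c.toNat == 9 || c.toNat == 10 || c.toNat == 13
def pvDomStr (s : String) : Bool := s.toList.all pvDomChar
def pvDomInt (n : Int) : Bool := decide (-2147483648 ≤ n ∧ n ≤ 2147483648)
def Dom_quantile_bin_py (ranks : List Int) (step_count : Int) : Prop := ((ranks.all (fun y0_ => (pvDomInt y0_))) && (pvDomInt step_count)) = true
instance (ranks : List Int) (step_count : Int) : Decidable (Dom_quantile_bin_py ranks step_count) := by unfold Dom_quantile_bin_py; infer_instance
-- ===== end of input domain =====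

-- B replaces A's sort-enumerate-scatter by a direct stable-rank-counting pass (alternative decomposition, same results).

-- ===== PORT A =====
def quantile_bin_py (ranks : List Int) (step_count : Int) : List Int :=
  if step_count ≤ 0 then []    -- Python raises CocoExportError here; excluded by Pre_
  else if ranks = [] then []
  else
    let n : Int := PySem.List.len ranks
    if n ≤ step_count then ranks
    else
      let sorted_pairs := PySem.List.sorted (PySem.List.enumerate ranks) (fun p => p.2)
      let binned : List Int := List.replicate ranks.length 0
      (PySem.List.enumerate sorted_pairs).foldl
        (fun binned q =>
          PySem.List.pySetD binned q.2.1 (PySem.Int.floordiv (q.1 * step_count) n + 1))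
        binned

-- ===== PORT B =====
def quantile_bin_py_alt (ranks : List Int) (step_count : Int) : List Int :=
  if step_count ≤ 0 then []    -- Python raises CocoExportError here; excluded by Pre_
  else if ranks = [] then []
  else
    let n : Int := PySem.List.len ranks
    if n ≤ step_count then ranks
    else
      (PySem.List.enumerate ranks).foldl
        (fun out p =>
          let pos : Int := (PySem.List.enumerate ranks).foldl
            (fun pos q => if q.2 < p.2 ∨ (q.2 = p.2 ∧ q.1 < p.1) then pos + 1 else pos) 0
          out ++ [PySem.Int.floordiv (pos * step_count) n + 1]) []

-- ===== PRECONDITION & SPEC =====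
-- Pre_ excludes exactly step_count ≤ 0, where A raises CocoExportError.
def Pre_quantile_bin_py (ranks : List Int) (step_count : Int) : Prop := 0 < step_count
instance (ranks : List Int) (step_count : Int) : Decidable (Pre_quantile_bin_py ranks step_count) := by unfold Pre_quantile_bin_py; infer_instance
def pvWitness_quantile_bin_py : List Int × Int := ([3, 1, 2, 1], 2)

def Spec_quantile_bin_py (ranks : List Int) (step_count : Int) (out : List Int) : Prop := out = quantile_bin_py_alt ranks step_count
instance (ranks : List Int) (step_count : Int) (out : List Int) : Decidable (Spec_quantile_bin_py ranks step_count out) := by unfold Spec_quantile_bin_py; infer_instance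

-- ===== CLAIM (what is proved, stated in full; the proofs are below) =====
def Claim_equal_quantile_bin_py : Prop := ∀ (ranks : List Int) (step_count : Int), Dom_quantile_bin_py ranks step_count → Pre_quantile_bin_py ranks step_count → Spec_quantile_bin_py ranks step_count (quantile_bin_py ranks step_count)

-- ===== LEMMAS AND PROOFS =====

def pvRb (q p : Int × Int) : Bool := decide (q.2 < p.2 ∨ (q.2 = p.2 ∧ q.1 < p.1))

theorem pvRb_irrefl (p : Int × Int) : pvRb p p = false := by simp [pvRb]

theorem pvRb_asymm {q p : Int × Int} (h : pvRb q p = true) : pvRb p q = false := by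
  simp only [pvRb, decide_eq_true_eq, decide_eq_false_iff_not] at h ⊢
  omega

theorem pv_insertBy_cons {α : Type} (b : α → α → Bool) (x y : α) (ys : List α) :
    PySem.List.insertBy b x (y :: ys) =
      if b x y then x :: y :: ys else y :: PySem.List.insertBy b x ys := rfl

theorem pv_insertBy_pairwise (x : Int × Int) (ys : List (Int × Int))
    (hp : ys.Pairwise (fun q p => pvRb q p = true))
    (hlt : ∀ y ∈ ys, y.1 < x.1) :
    (PySem.List.insertBy (fun a b => decide (a.2 < b.2)) x ys).Pairwise
      (fun q p => pvRb q p = true) := by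
  induction ys with
  | nil => simp [PySem.List.insertBy]
  | cons y ys ih =>
    rw [pv_insertBy_cons]
    rcases List.pairwise_cons.mp hp with ⟨hy, hys⟩
    by_cases hxy : x.2 < y.2
    · simp only [hxy, decide_true, if_true]
      refine List.Pairwise.cons ?_ hp
      intro z hz
      rcases List.mem_cons.mp hz with rfl | hz
      · simp only [pvRb, decide_eq_true_eq]; exact Or.inl hxy
      · have h2 := hy z hz
        simp only [pvRb, decide_eq_true_eq] at h2 ⊢
        omega
    · simp only [hxy, decide_false]
      refine List.Pairwise.cons ?_ (ih hys (fun a ha => hlt a (List.mem_cons_of_mem _ ha)))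
      intro z hz
      rcases (PySem.List.mem_insertBy _ _ _ _).mp hz with rfl | hz
      · have h1 := hlt y (List.mem_cons_self ..)
        simp only [pvRb, decide_eq_true_eq]
        omega
      · exact hy z hz

theorem pv_foldl_insertBy_pairwise (L acc : List (Int × Int))
    (hL : L.Pairwise (fun p q => p.1 < q.1))
    (hacc : acc.Pairwise (fun q p => pvRb q p = true))
    (hcross : ∀ a ∈ acc, ∀ b ∈ L, a.1 < b.1) :
    (L.foldl (fun acc x => PySem.List.insertBy (fun a b => decide (a.2 < b.2)) x acc) acc).Pairwise
      (fun q p => pvRb q p = true) := by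
  induction L generalizing acc with
  | nil => simpa using hacc
  | cons x L ih =>
    simp only [List.foldl_cons]
    rcases List.pairwise_cons.mp hL with ⟨hx, hL'⟩
    refine ih _ hL' (pv_insertBy_pairwise x acc hacc
      (fun a ha => hcross a ha x (List.mem_cons_self ..))) ?_
    intro a ha b hb
    rcases (PySem.List.mem_insertBy _ _ _ _).mp ha with rfl | ha
    · exact hx b hb
    · exact hcross a ha b (List.mem_cons_of_mem _ hb)

theorem pv_sorted_pairwise (ranks : List Int) :
    (PySem.List.sorted (PySem.List.enumerate ranks) (fun p => p.2)).Pairwise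
      (fun q p => pvRb q p = true) := by
  rw [PySem.List.sorted_eq_foldl_insertBy]
  exact pv_foldl_insertBy_pairwise _ [] (PySem.List.pairwise_lt_enumerate ranks 0)
    (List.Pairwise.nil) (by intro a ha; simp at ha)

theorem pv_countP_pairwise (S : List (Int × Int))
    (hS : S.Pairwise (fun q p => pvRb q p = true)) (k : Nat) (hk : k < S.length) :
    S.countP (fun q => pvRb q S[k]) = k := by
  induction S generalizing k with
  | nil => simp at hk
  | cons s S ih =>
    rcases List.pairwise_cons.mp hS with ⟨hs, hS'⟩
    cases k with
    | zero =>
      simp only [List.getElem_cons_zero, List.countP_cons, pvRb_irrefl]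
      simp only [if_false, Bool.false_eq_true, add_zero]
      rw [List.countP_eq_zero]
      intro q hq
      simpa using pvRb_asymm (hs q hq)
    | succ k =>
      have hk' : k < S.length := by simpa using hk
      simp only [List.getElem_cons_succ, List.countP_cons]
      rw [ih hS' k hk']
      have hmem : S[k] ∈ S := List.getElem_mem _
      simp [hs _ hmem]


theorem pv_scatter_other (g : Int → Int) (L : List (Int × (Int × Int))) (b : List Int) (i : Nat)
    (h : ∀ q ∈ L, q.2.1 ≠ (i : Int)) (hpos : ∀ q ∈ L, 0 ≤ q.2.1) :
    (L.foldl (fun acc q => PySem.List.pySetD acc q.2.1 (g q.1)) b)[i]? = b[i]? := by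
  induction L generalizing b with
  | nil => rfl
  | cons q L ih =>
    simp only [List.foldl_cons]
    rw [ih _ (fun q' hq' => h q' (List.mem_cons_of_mem _ hq'))
        (fun q' hq' => hpos q' (List.mem_cons_of_mem _ hq'))]
    rw [PySem.List.pySetD_of_nonneg _ _ (hpos q (List.mem_cons_self ..))]
    apply List.getElem?_set_ne
    have h1 := h q (List.mem_cons_self ..)
    have h2 := hpos q (List.mem_cons_self ..)
    omega

theorem pv_scatter_length (g : Int → Int) (L : List (Int × (Int × Int))) (b : List Int) :
    (L.foldl (fun acc q => PySem.List.pySetD acc q.2.1 (g q.1)) b).length = b.length := by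
  induction L generalizing b with
  | nil => rfl
  | cons q L ih => simp only [List.foldl_cons]; rw [ih, PySem.List.length_pySetD]

theorem pv_scatter_hit (g : Int → Int) (S : List (Int × Int)) (b : List Int) (i k : Nat)
    (hk : k < S.length) (hik : S[k].1 = (i : Int))
    (huniq : ∀ l, (hl : l < S.length) → S[l].1 = (i : Int) → l = k)
    (hpos : ∀ q ∈ S, 0 ≤ q.1) (hilen : i < b.length) :
    ((PySem.List.enumerate S).foldl
        (fun acc q => PySem.List.pySetD acc q.2.1 (g q.1)) b)[i]? = some (g k) := by
  have hsplit : S = S.take k ++ S[k] :: S.drop (k + 1) := by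
    rw [← List.drop_eq_getElem_cons hk, List.take_append_drop]
  have hlt : (S.take k).length = k := by simp [List.length_take]; omega
  have hdroplen : (S.drop (k + 1)).length = S.length - (k + 1) := List.length_drop
  conv_lhs => rw [hsplit]
  rw [PySem.List.enumerate_append, PySem.List.enumerate_cons, List.foldl_append,
    List.foldl_cons]
  rw [pv_scatter_other]
  · simp only [hik, hlt, zero_add]
    rw [PySem.List.pySetD_natCast]
    rw [List.getElem?_set_self (by rw [pv_scatter_length]; exact hilen)]
  · intro q hq
    rcases (PySem.List.mem_enumerate_iff _ _ _).mp hq with ⟨m, hm, rfl⟩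
    have hm' : k + 1 + m < S.length := by omega
    have he : (S.drop (k + 1))[m] = S[k + 1 + m]'hm' := by
      rw [List.getElem_drop]
    simp only [he]
    intro hcontra
    have := huniq (k + 1 + m) hm' hcontra
    omega
  · intro q hq
    rcases (PySem.List.mem_enumerate_iff _ _ _).mp hq with ⟨m, hm, rfl⟩
    have hm' : k + 1 + m < S.length := by omega
    have he : (S.drop (k + 1))[m] = S[k + 1 + m]'hm' := by
      rw [List.getElem_drop]
    simp only [he]
    exact hpos _ (List.getElem_mem _)

-- count loop of B = countP under pvRb
theorem pv_count_loop (E : List (Int × Int)) (p : Int × Int) :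
    E.foldl (fun pos q => if q.2 < p.2 ∨ (q.2 = p.2 ∧ q.1 < p.1) then pos + 1 else pos) (0 : Int)
      = (E.countP (fun q => pvRb q p) : Int) := by
  have h := PySem.List.foldl_count_if (fun q => pvRb q p) E 0
  rw [zero_add] at h
  rw [← h]
  congr 1
  funext pos q
  by_cases hq : q.2 < p.2 ∨ (q.2 = p.2 ∧ q.1 < p.1)
  · simp [hq, pvRb]
  · simp [hq, pvRb]

-- injectivity of positions with nodup fsts
theorem pv_fst_inj (S : List (Int × Int)) (h : (S.map (fun x => x.1)).Nodup)
    (l k : Nat) (hl : l < S.length) (hk : k < S.length) (he : S[l].1 = S[k].1) : l = k := by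
  have hinj := List.nodup_iff_injective_getElem.mp h
  have hml : l < (S.map (fun x => x.1)).length := by simpa using hl
  have hmk : k < (S.map (fun x => x.1)).length := by simpa using hk
  have : (⟨l, hml⟩ : Fin _) = ⟨k, hmk⟩ := by
    apply hinj
    simp only [List.getElem_map]
    exact he
  exact congrArg Fin.val this

theorem pv_main (ranks : List Int) (step_count : Int) :
    (PySem.List.enumerate (PySem.List.sorted (PySem.List.enumerate ranks) (fun p => p.2))).foldl
        (fun binned q => PySem.List.pySetD binned q.2.1
          (PySem.Int.floordiv (q.1 * step_count) (PySem.List.len ranks) + 1))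
        (List.replicate ranks.length 0)
      = (PySem.List.enumerate ranks).foldl
        (fun out p =>
          out ++ [PySem.Int.floordiv
            (((PySem.List.enumerate ranks).foldl
              (fun pos q => if q.2 < p.2 ∨ (q.2 = p.2 ∧ q.1 < p.1) then pos + 1 else pos) 0)
              * step_count) (PySem.List.len ranks) + 1]) [] := by
  set n : Int := PySem.List.len ranks with hn
  set E := PySem.List.enumerate ranks with hE
  set S := PySem.List.sorted E (fun p => p.2) with hS
  have hperm : S.Perm E := PySem.List.sorted_perm _ _ _
  have hlenE : E.length = ranks.length := PySem.List.length_enumerate _ _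
  have hlenS : S.length = ranks.length := by
    rw [hS, PySem.List.length_sorted, hlenE]
  have hpairS := pv_sorted_pairwise ranks
  rw [← hE, ← hS] at hpairS
  have hposS : ∀ q ∈ S, 0 ≤ q.1 := by
    intro q hq
    have hqE : q ∈ E := hperm.mem_iff.mp hq
    rcases (PySem.List.mem_enumerate_iff _ _ _).mp hqE with ⟨m, hm, rfl⟩
    simp
  have hnodup : (S.map (fun x => x.1)).Nodup := by
    have h1 : (E.map (fun x => x.1)).Pairwise (· < ·) := by
      rw [List.pairwise_map]
      exact PySem.List.pairwise_lt_enumerate ranks 0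
    have h2 : (E.map (fun x => x.1)).Nodup := h1.imp (fun h => ne_of_lt h)
    exact ((hperm.map (fun x => x.1)).nodup_iff).mpr h2
  -- rewrite RHS into a map
  rw [PySem.List.foldl_append_singleton_eq_map
    (fun p => PySem.Int.floordiv
      ((E.foldl (fun pos q => if q.2 < p.2 ∨ (q.2 = p.2 ∧ q.1 < p.1) then pos + 1 else pos) 0)
        * step_count) n + 1) E []]
  rw [List.nil_append]
  apply List.ext_getElem?
  intro i
  by_cases hi : i < ranks.length
  · -- the unique position k of (i, ranks[i]) in S
    have hmemE : ((0 : Int) + (i : Int), ranks[i]) ∈ E := by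
      rw [hE, PySem.List.mem_enumerate_iff]
      exact ⟨i, hi, rfl⟩
    have hmemS : ((0 : Int) + (i : Int), ranks[i]) ∈ S := hperm.mem_iff.mpr hmemE
    obtain ⟨k, hk, hSk⟩ := List.mem_iff_getElem.mp hmemS
    have hik : S[k].1 = (i : Int) := by rw [hSk]; simp
    have huniq : ∀ l, (hl : l < S.length) → S[l].1 = (i : Int) → l = k := by
      intro l hl hil
      exact pv_fst_inj S hnodup l k hl hk (by rw [hil, hik])
    have hhit := pv_scatter_hit
      (fun t => PySem.Int.floordiv (t * step_count) n + 1) S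
      (List.replicate ranks.length 0) i k hk hik huniq hposS (by simpa using hi)
    have hcount : (k : Nat) = E.countP (fun q => pvRb q ((0 : Int) + (i : Int), ranks[i])) := by
      have h1 := pv_countP_pairwise S hpairS k hk
      rw [hSk] at h1
      rw [← h1]
      exact hperm.countP_eq _
    have hrhs : (E.map (fun p => PySem.Int.floordiv
        ((E.foldl (fun pos q => if q.2 < p.2 ∨ (q.2 = p.2 ∧ q.1 < p.1) then pos + 1 else pos) 0)
          * step_count) n + 1))[i]? =
        some (PySem.Int.floordiv ((k : Int) * step_count) n + 1) := by
      rw [List.getElem?_map, hE, PySem.List.getElem?_enumerate]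
      rw [List.getElem?_eq_getElem hi]
      simp only [Option.map_some]
      rw [← hE, pv_count_loop E ((0 : Int) + (i : Int), ranks[i])]
      rw [← hcount]
    rw [hrhs]
    exact hhit
  · have hlenL : ((PySem.List.enumerate S).foldl
        (fun binned q => PySem.List.pySetD binned q.2.1
          (PySem.Int.floordiv (q.1 * step_count) n + 1))
        (List.replicate ranks.length 0)).length = ranks.length := by
      rw [pv_scatter_length (fun t => PySem.Int.floordiv (t * step_count) n + 1)]
      simp
    have hL : ranks.length ≤ i := by omega
    rw [List.getElem?_eq_none (by rw [hlenL]; exact hL),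
        List.getElem?_eq_none (by simpa [hlenE] using hL)]

theorem quantile_bin_py_spec : Claim_equal_quantile_bin_py := by
  intro ranks step_count hdom hpre
  unfold Pre_quantile_bin_py at hpre
  unfold Spec_quantile_bin_py
  simp only [quantile_bin_py, quantile_bin_py_alt, if_neg (not_le.mpr hpre)]
  by_cases h2 : ranks = []
  · simp [h2]
  · rw [if_neg h2, if_neg h2]
    by_cases h3 : PySem.List.len ranks ≤ step_count
    · rw [if_pos h3, if_pos h3]
    · rw [if_neg h3, if_neg h3]
      exact pv_main ranks step_count
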